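-- pv_equiv track=rewrite | github.com/euanwm/OpenWeightlifting | backend/database_handler/web_scrapers.py | table_to_list
-- ===== SOURCE A (Python) =====
-- def funcy_shit(the_shit) -> list:
--     """adds category onto end of result line"""
--     new = []
--     for x in the_shit[1::]:
--         x.insert(0, the_shit[0][0])
--         new.append(x)
--     return new
--
-- def table_to_list(shit) -> list:
--     """takes the janky html table data and does some weird shit to it"""
--     final = []
--     new_shit = shit[1::]
--     cats_pos = [x for x, y in enumerate(new_shit) if len(y) == 1]
--     for index, elem in enumerate(cats_pos):
--         try:
--             meh = new_shit[elem:cats_pos[index + 1]:]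
--             final.append(funcy_shit(meh))
--         except IndexError:
--             meh_2 = (new_shit[elem::])
--             final.append(funcy_shit(meh_2))
--     flatten_list = [item for sublist in final for item in sublist]
--     return flatten_list
-- ===== SOURCE B (Python) =====
-- def table_to_list(shit) -> list:
--     """takes the janky html table data and does some weird shit to it"""
--     result = []
--     current_category = None
--     for row in shit[1:]:
--         if len(row) == 1:
--             current_category = row[0]
--         elif current_category is not None:
--             row.insert(0, current_category)
--             result.append(row)
--     return result
-- ===== Notes on version B (the rewrite author's own statement) =====
-- stated objective: simpler
-- what changed: Replaced the header-index collection plus per-segment slicing and a flatten with a single stateful pass that tracks the current category and prepends it to each non-header row.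
import Mathlib
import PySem

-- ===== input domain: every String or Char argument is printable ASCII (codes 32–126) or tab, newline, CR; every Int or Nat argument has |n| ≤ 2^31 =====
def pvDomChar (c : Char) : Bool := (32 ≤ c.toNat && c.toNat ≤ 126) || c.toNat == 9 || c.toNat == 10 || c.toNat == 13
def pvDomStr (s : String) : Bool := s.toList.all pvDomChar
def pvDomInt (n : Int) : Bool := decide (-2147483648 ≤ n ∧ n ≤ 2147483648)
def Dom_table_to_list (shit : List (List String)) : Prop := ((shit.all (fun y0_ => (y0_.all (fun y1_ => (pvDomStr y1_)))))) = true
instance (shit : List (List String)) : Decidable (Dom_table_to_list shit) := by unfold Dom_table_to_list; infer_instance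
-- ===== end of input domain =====

-- B is a single stateful pass (running current-category variable) instead of A's index
-- collection + segment slicing + flatten; equivalence is about the return value (both
-- Pythons also perform the same in-place row.insert mutations).

-- ===== PORT A =====
-- funcy_shit: the_shit[0][0] is read with headD; exact for every call table_to_list makes
-- (segments always start with a length-1 row).
def funcy_shit (the_shit : List (List String)) : List (List String) :=
  let cat := (the_shit.headD []).headD ""
  (PySem.List.slice the_shit (some 1) none).foldl (fun new x => new ++ [cat :: x]) []

def table_to_list (shit : List (List String)) : List (List String) :=
  let new_shit := PySem.List.slice shit (some 1) none
  let cats_pos := (PySem.List.enumerate new_shit 0).filterMap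
    (fun p => if p.2.length = 1 then some p.1 else none)
  let final := (PySem.List.enumerate cats_pos 0).foldl
    (fun final p =>
      match PySem.List.pyGet? cats_pos (p.1 + 1) with
      | some nxt => final ++ [funcy_shit (PySem.List.slice new_shit (some p.2) (some nxt))]
      | none => final ++ [funcy_shit (PySem.List.slice new_shit (some p.2) none)]) []
  final.flatten

-- ===== PORT B =====
def table_to_list_alt (shit : List (List String)) : List (List String) :=
  ((PySem.List.slice shit (some 1) none).foldl
    (fun (st : List (List String) × Option String) row =>
      if row.length = 1 then (st.1, some (row.headD ""))
      else
        match st.2 with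
        | some c => (st.1 ++ [c :: row], st.2)
        | none => st)
    (([] : List (List String)), (none : Option String))).1

-- ===== PRECONDITION & SPEC =====
def Spec_table_to_list (shit : List (List String)) (out : List (List String)) : Prop := out = table_to_list_alt shit
instance (shit : List (List String)) (out : List (List String)) : Decidable (Spec_table_to_list shit out) := by unfold Spec_table_to_list; infer_instance

-- ===== CLAIM (what is proved, stated in full; the proofs are below) =====
def Claim_equal_table_to_list : Prop := ∀ (shit : List (List String)), Dom_table_to_list shit → Spec_table_to_list shit (table_to_list shit)

-- ===== LEMMAS AND PROOFS =====

-- common specification: g c t prepends the running category c, f t waits for the first header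
def gSpec (c : String) : List (List String) → List (List String)
  | [] => []
  | r :: t => if r.length = 1 then gSpec (r.headD "") t else (c :: r) :: gSpec c t

def fSpec : List (List String) → List (List String)
  | [] => []
  | r :: t => if r.length = 1 then gSpec (r.headD "") t else fSpec t

-- positions of the length-1 header rows (Nat form of A's cats_pos)
def catsN : List (List String) → List Nat
  | [] => []
  | r :: t => if r.length = 1 then 0 :: (catsN t).map (· + 1) else (catsN t).map (· + 1)

-- A's segments, one per header position, with the lookahead at the next position
def segs (l : List (List String)) : List Nat → List (List (List String))
  | [] => []
  | p :: ps =>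
      funcy_shit (match ps.head? with
        | some q => (l.drop p).take (q - p)
        | none => l.drop p) :: segs l ps


theorem funcy_eq (r : List String) (seg : List (List String)) :
    funcy_shit (r :: seg) = seg.map ((r.headD "") :: ·) := by
  unfold funcy_shit
  rw [PySem.List.slice_from_one]
  simp only [List.tail_cons, List.headD_cons]
  rw [PySem.List.foldl_append_singleton_eq_map]
  simp

theorem cats_eq (l : List (List String)) (s : Int) :
    (PySem.List.enumerate l s).filterMap (fun p => if p.2.length = 1 then some p.1 else none)
      = (catsN l).map (fun n : Nat => s + (n : Int)) := by
  induction l generalizing s with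
  | nil => rfl
  | cons r t ih =>
      rw [PySem.List.enumerate_cons, List.filterMap_cons]
      by_cases h : r.length = 1
      · rw [if_pos h, ih]
        rw [catsN, if_pos h, List.map_cons, List.map_map]
        refine congrArg₂ List.cons (by norm_num) (List.map_congr_left fun n _ => ?_)
        simp only [Function.comp_apply]
        push_cast
        ring
      · rw [if_neg h, ih, catsN, if_neg h, List.map_map]
        exact List.map_congr_left fun n _ => by simp only [Function.comp_apply]; push_cast; ring

theorem segs_shift (cs : List Nat) (r : List String) (l' : List (List String)) :
    segs (r :: l') (cs.map (· + 1)) = segs l' cs := by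
  induction cs with
  | nil => rfl
  | cons p ps ih =>
      simp only [List.map_cons, segs, List.head?_map, List.drop_succ_cons]
      rw [ih]
      cases hps : ps.head? with
      | none => simp
      | some q => simp [Nat.succ_sub_succ]

theorem gSpec_eq (t : List (List String)) (c : String) :
    gSpec c t = (match catsN t with
      | [] => t.map (c :: ·)
      | q :: _ => (t.take q).map (c :: ·) ++ fSpec t) := by
  induction t generalizing c with
  | nil => rfl
  | cons r t' ih =>
      by_cases h : r.length = 1
      · simp [gSpec, fSpec, catsN, h]
      · cases hc : catsN t' with
        | nil => simp [gSpec, catsN, h, hc, ih]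
        | cons q cs' => simp [gSpec, fSpec, catsN, h, hc, ih]

theorem flatten_segs (l : List (List String)) :
    (segs l (catsN l)).flatten = fSpec l := by
  induction l with
  | nil => rfl
  | cons r t ih =>
      by_cases h : r.length = 1
      · cases hc : catsN t with
        | nil =>
            simp [catsN, h, hc, segs, funcy_eq, fSpec, gSpec_eq]
        | cons q cs' =>
            have hseg : segs (r :: t) ((catsN t).map (· + 1)) = segs t (catsN t) :=
              segs_shift _ _ _
            have ih' : (segs t (q :: cs')).flatten = fSpec t := by rw [← hc]; exact ih
            simp only [segs, List.flatten_cons] at ih'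
            simp only [catsN, if_pos h, hc, List.map_cons, segs, List.head?_cons] at hseg ⊢
            rw [hseg]
            simp [funcy_eq, fSpec, h, gSpec_eq, hc, ih', List.take_succ_cons]
      · have hseg : segs (r :: t) ((catsN t).map (· + 1)) = segs t (catsN t) :=
          segs_shift _ _ _
        simp [catsN, h, hseg, ih, fSpec]

theorem loopA (l : List (List String)) :
    ∀ (cs₂ cs₁ : List Nat) (acc : List (List (List String))),
    (PySem.List.enumerate (cs₂.map (fun n : Nat => (n : Int))) (cs₁.length : Int)).foldl
      (fun final p =>
        match PySem.List.pyGet? ((cs₁ ++ cs₂).map (fun n : Nat => (n : Int))) (p.1 + 1) with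
        | some nxt => final ++ [funcy_shit (PySem.List.slice l (some p.2) (some nxt))]
        | none => final ++ [funcy_shit (PySem.List.slice l (some p.2) none)]) acc
      = acc ++ segs l cs₂ := by
  intro cs₂
  induction cs₂ with
  | nil => intro cs₁ acc; simp [segs]
  | cons p ps ih =>
      intro cs₁ acc
      rw [List.map_cons, PySem.List.enumerate_cons, List.foldl_cons]
      have hidx : ((cs₁.length : Int) + 1) = ((cs₁.length + 1 : Nat) : Int) := by push_cast; ring
      have hget : PySem.List.pyGet? ((cs₁ ++ p :: ps).map (fun n : Nat => (n : Int)))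
            ((cs₁.length : Int) + 1) = (ps.map (fun n : Nat => (n : Int)))[0]? := by
        rw [hidx, PySem.List.pyGet?_natCast, List.map_append, List.map_cons]
        rw [List.getElem?_append_right (by simp)]
        simp
      have hstep := ih (cs₁ ++ [p])
      simp only [List.append_assoc, List.singleton_append, List.length_append,
        List.length_singleton, Nat.cast_add, Nat.cast_one] at hstep
      cases hps : ps with
      | nil =>
          subst hps
          simp only [hget, List.getElem?_nil, List.map_nil]
          rw [PySem.List.slice_from_natCast]
          simp only [List.map_nil] at hstep
          rw [hstep]
          simp [segs]
      | cons q ps' =>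
          subst hps
          simp only [hget, List.map_cons, List.getElem?_cons_zero]
          rw [PySem.List.slice_natCast]
          simp only [List.map_cons] at hstep
          rw [hstep]
          simp [segs]

theorem alt_loop :
    ∀ (t : List (List String)) (acc : List (List String)) (c? : Option String),
    (t.foldl (fun (st : List (List String) × Option String) row =>
        if row.length = 1 then (st.1, some (row.headD ""))
        else match st.2 with
          | some c => (st.1 ++ [c :: row], st.2)
          | none => st) (acc, c?)).1
      = acc ++ (match c? with | some c => gSpec c t | none => fSpec t) := by
  intro t
  induction t with
  | nil => intro acc c?; cases c? <;> simp [gSpec, fSpec]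
  | cons r t ih =>
      intro acc c?
      by_cases h : r.length = 1
      · cases c? with
        | none =>
            simp only [List.foldl_cons, if_pos h]
            rw [ih]
            simp [fSpec, h]
        | some c =>
            simp only [List.foldl_cons, if_pos h]
            rw [ih]
            simp [gSpec, h]
      · cases c? with
        | none =>
            simp only [List.foldl_cons, if_neg h]
            rw [ih]
            simp [fSpec, h]
        | some c =>
            simp only [List.foldl_cons, if_neg h]
            rw [ih]
            simp [gSpec, h]

theorem A_eq (shit : List (List String)) : table_to_list shit = fSpec shit.tail := by
  simp only [table_to_list]
  rw [PySem.List.slice_from_one, cats_eq]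
  rw [show (catsN shit.tail).map (fun n : Nat => (0 : Int) + (n : Int))
        = (catsN shit.tail).map (fun n : Nat => (n : Int)) from
      List.map_congr_left fun n _ => by ring]
  have h := loopA shit.tail (catsN shit.tail) [] []
  simp only [List.nil_append, List.length_nil, Nat.cast_zero] at h
  rw [h]
  exact flatten_segs shit.tail

theorem B_eq (shit : List (List String)) : table_to_list_alt shit = fSpec shit.tail := by
  simp only [table_to_list_alt]
  rw [PySem.List.slice_from_one, alt_loop shit.tail [] none]
  simp

-- ===== VERDICT (by name: the statement is the Claim_ definition above) =====
theorem table_to_list_spec : Claim_equal_table_to_list := by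
  intro shit _
  unfold Spec_table_to_list
  rw [A_eq, B_eq]
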